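-- pv_equiv track=rewrite | github.com/sayedgamal99/Problem-Solving | Contests/Codeforces Round 939 (Div. 2)/A.py | winners
-- ===== SOURCE A (Python) =====
-- def winners(n, A):
--     while True:
--         kicked = 0
--         for i in A:
--             if i <= n:
--                 kicked += 1
--             else:
--                 break
--         if kicked == 0:
--             return n
--         n = n - kicked
-- ===== SOURCE B (Python) =====
-- def winners(n, A):
--     # prefix maxima: M[i] = max(A[0..i]); the kicked count at value v is
--     # the number of leading entries of M that are <= v, and M is nondecreasing.
--     M = []
--     m = None
--     for x in A:
--         m = x if m is None or x > m else m
--         M.append(m)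
--     k = len(M)
--     while True:
--         while k > 0 and M[k - 1] > n:
--             k -= 1
--         if k == 0:
--             return n
--         # while the count stays k, each round subtracts k; jump over all of
--         # those rounds at once (t = number of rounds until n drops below M[k-1])
--         n -= ((n - M[k - 1]) // k + 1) * k
-- ===== Notes on version B (the rewrite author's own statement) =====
-- stated objective: alternative
-- what changed: Instead of rescanning A to recount the kicked prefix after every single subtraction, B precomputes the prefix maxima (nondecreasing), walks the count pointer down monotonically, and jumps over every regime of constant count with one closed-form division step.
import Mathlib
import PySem

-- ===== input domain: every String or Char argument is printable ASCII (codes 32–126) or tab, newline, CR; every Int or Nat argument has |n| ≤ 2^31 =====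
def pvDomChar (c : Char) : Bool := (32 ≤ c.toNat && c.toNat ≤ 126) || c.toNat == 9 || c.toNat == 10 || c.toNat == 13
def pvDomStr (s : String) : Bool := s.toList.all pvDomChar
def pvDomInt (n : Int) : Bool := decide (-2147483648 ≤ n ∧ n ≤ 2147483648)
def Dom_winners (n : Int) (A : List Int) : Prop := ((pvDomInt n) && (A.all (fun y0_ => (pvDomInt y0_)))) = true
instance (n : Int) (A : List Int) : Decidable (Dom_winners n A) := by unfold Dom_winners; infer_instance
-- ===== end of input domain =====

-- B precomputes prefix maxima and jumps over constant-count regimes in closed form,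
-- replacing A's rescan-per-subtraction loop (objective: alternative algorithm).


-- ===== PORT A =====
-- the inner 'for i in A: if i <= n: kicked += 1 else: break'
def kickedLoop (n : Int) : List Int → Nat
  | [] => 0
  | i :: rest => if i ≤ n then kickedLoop n rest + 1 else 0

-- the outer 'while True' loop; terminates because n strictly decreases while A.head ≤ n
def winners (n : Int) (A : List Int) : Int :=
  if kickedLoop n A = 0 then n else winners (n - (kickedLoop n A : Int)) A
termination_by (match A with | [] => 0 | a :: _ => (n + 1 - a).toNat)
decreasing_by
  rename_i h
  match A with
  | [] => simp [kickedLoop] at h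
  | a :: rest =>
    simp only
    have ha : a ≤ n := by
      by_contra hc
      simp [kickedLoop, hc] at h
    have h1 : 1 ≤ kickedLoop n (a :: rest) := Nat.one_le_iff_ne_zero.mpr h
    have : (1 : Int) ≤ (kickedLoop n (a :: rest) : Int) := by exact_mod_cast h1
    omega

-- ===== PORT B =====
-- 'for x in A: m = x if m is None or x > m else m; M.append(m)'
def pmaxAux (m : Option Int) : List Int → List Int
  | [] => []
  | x :: xs =>
    let m' := match m with
      | none => x
      | some v => if x > v then x else v
    m' :: pmaxAux (some m') xs

-- 'while k > 0 and M[k-1] > n: k -= 1'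
def dropK (n : Int) (M : List Int) : Nat → Nat
  | 0 => 0
  | k + 1 => if M.getD k 0 > n then dropK n M k else k + 1

theorem dropK_le (n : Int) (M : List Int) (k : Nat) : dropK n M k ≤ k := by
  induction k with
  | zero => simp [dropK]
  | succ k ih => simp only [dropK]; split <;> omega

-- after a jump n' lands strictly below M[dropK-1], so the dropK pointer strictly drops
theorem jump_lt (n : Int) (M : List Int) (k : Nat) (h : dropK n M k ≠ 0) :
    dropK (n - (PySem.Int.floordiv (n - M.getD (dropK n M k - 1) 0) ((dropK n M k : Nat) : Int) + 1)
        * ((dropK n M k : Nat) : Int)) M (dropK n M k) < dropK n M k := by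
  obtain ⟨j, hj⟩ : ∃ j, dropK n M k = j + 1 := ⟨dropK n M k - 1, by omega⟩
  rw [hj]
  simp only [Nat.add_sub_cancel]
  set m := M.getD j 0 with hm
  set q := PySem.Int.floordiv (n - m) ((j + 1 : Nat) : Int) with hq
  have hpos : (0 : Int) < ((j + 1 : Nat) : Int) := by exact_mod_cast Nat.succ_pos j
  have hbr := (PySem.Int.floordiv_eq_iff_of_pos (a := n - m) (b := ((j + 1 : Nat) : Int)) hpos).mp hq.symm
  have hlt : n - (q + 1) * ((j + 1 : Nat) : Int) < m := by linarith [hbr.2]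
  have hstep : dropK (n - (q + 1) * ((j + 1 : Nat) : Int)) M (j + 1)
      = dropK (n - (q + 1) * ((j + 1 : Nat) : Int)) M j := by
    simp only [dropK]
    rw [if_pos (by linarith)]
  calc dropK (n - (q + 1) * ((j + 1 : Nat) : Int)) M (j + 1)
      = _ := hstep
    _ ≤ j := dropK_le _ _ _
    _ < j + 1 := Nat.lt_succ_self j

-- the outer 'while True' loop of B
def outerLoop (n : Int) (M : List Int) (k : Nat) : Int :=
  let k' := dropK n M k
  if h : k' = 0 then n
  else
    let m := M.getD (k' - 1) 0
    let t := PySem.Int.floordiv (n - m) (k' : Int) + 1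
    outerLoop (n - t * (k' : Int)) M k'
termination_by dropK n M k
decreasing_by
  exact jump_lt n M k h

def winners_alt (n : Int) (A : List Int) : Int :=
  let M := pmaxAux none A
  outerLoop n M M.length

-- ===== PRECONDITION & SPEC =====
def Spec_winners (n : Int) (A : List Int) (out : Int) : Prop := out = winners_alt n A
instance (n : Int) (A : List Int) (out : Int) : Decidable (Spec_winners n A out) := by unfold Spec_winners; infer_instance

-- ===== CLAIM (what is proved, stated in full; the proofs are below) =====
def Claim_equal_winners : Prop := ∀ (n : Int) (A : List Int), Dom_winners n A → Spec_winners n A (winners n A)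

-- ===== LEMMAS AND PROOFS =====

theorem kicked_le_length (n : Int) (M : List Int) : kickedLoop n M ≤ M.length := by
  induction M with
  | nil => simp [kickedLoop]
  | cons x xs ih => simp only [kickedLoop, List.length_cons]; split <;> omega

theorem kicked_mono (A : List Int) (n' n : Int) (h : n' ≤ n) :
    kickedLoop n' A ≤ kickedLoop n A := by
  induction A with
  | nil => simp [kickedLoop]
  | cons x xs ih =>
    simp only [kickedLoop]
    by_cases hx : x ≤ n'
    · rw [if_pos hx, if_pos (le_trans hx h)]; omega
    · rw [if_neg hx]; omega

theorem getD_le_of_lt_kicked (n : Int) (M : List Int) (j : Nat)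
    (h : j < kickedLoop n M) : M.getD j 0 ≤ n := by
  induction M generalizing j with
  | nil => simp [kickedLoop] at h
  | cons x xs ih =>
    simp only [kickedLoop] at h
    by_cases hx : x ≤ n
    · rw [if_pos hx] at h
      cases j with
      | zero => simpa using hx
      | succ j' => simpa using ih j' (by omega)
    · rw [if_neg hx] at h; omega

theorem lt_getD_of_kicked_le (n : Int) (M : List Int) (j : Nat)
    (hp : List.Pairwise (· ≤ ·) M) (h : kickedLoop n M ≤ j) (hj : j < M.length) :
    n < M.getD j 0 := by
  induction M generalizing j with
  | nil => simp at hj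
  | cons x xs ih =>
    obtain ⟨hx_all, hxs⟩ := List.pairwise_cons.mp hp
    simp only [kickedLoop] at h
    by_cases hx : x ≤ n
    · rw [if_pos hx] at h
      cases j with
      | zero => omega
      | succ j' =>
        simpa using ih j' hxs (by omega) (by simpa using hj)
    · cases j with
      | zero => simpa using not_le.mp hx
      | succ j' =>
        have hj' : j' < xs.length := by simpa using hj
        have hmem : xs.getD j' 0 ∈ xs := by
          rw [List.getD_eq_getElem xs 0 hj']; exact List.getElem_mem hj'
        have := hx_all _ hmem
        have hxn := not_le.mp hx
        simp only [List.getD_cons_succ]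
        omega

theorem le_kicked_of_getD_le (n : Int) (M : List Int) (c : Nat)
    (h : ∀ j, j < c → M.getD j 0 ≤ n) (hc : c ≤ M.length) : c ≤ kickedLoop n M := by
  induction M generalizing c with
  | nil => simp at hc; omega
  | cons x xs ih =>
    cases c with
    | zero => omega
    | succ c' =>
      have hx : x ≤ n := by simpa using h 0 (Nat.succ_pos c')
      simp only [kickedLoop, if_pos hx]
      have := ih c' (fun j hj => by simpa using h (j + 1) (by omega)) (by simpa using hc)
      omega

theorem getD_mono (M : List Int) (hp : List.Pairwise (· ≤ ·) M) (i j : Nat)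
    (hij : i ≤ j) (hj : j < M.length) : M.getD i 0 ≤ M.getD j 0 := by
  rcases Nat.lt_or_ge i j with hlt | hge
  · rw [List.getD_eq_getElem M 0 (by omega), List.getD_eq_getElem M 0 hj]
    exact List.pairwise_iff_getElem.mp hp i j _ hj hlt
  · have : i = j := by omega
    rw [this]

theorem kicked_pmaxAux (n : Int) (A : List Int) : ∀ (m : Int), m ≤ n →
    kickedLoop n (pmaxAux (some m) A) = kickedLoop n A := by
  induction A with
  | nil => intro m _; simp [pmaxAux]
  | cons x xs ih =>
    intro m hm
    simp only [pmaxAux, kickedLoop]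
    by_cases hx : x ≤ n
    · have hm' : (if x > m then x else m) ≤ n := by split <;> omega
      rw [if_pos hm', if_pos hx, ih _ hm']
    · have hxm : x > m := by omega
      rw [if_pos hxm, if_neg hx, if_neg hx]

theorem kicked_pmax (n : Int) (A : List Int) :
    kickedLoop n (pmaxAux none A) = kickedLoop n A := by
  cases A with
  | nil => rfl
  | cons x xs =>
    simp only [pmaxAux, kickedLoop]
    by_cases hx : x ≤ n
    · rw [if_pos hx, if_pos hx, kicked_pmaxAux n xs x hx]
    · rw [if_neg hx, if_neg hx]

theorem pmaxAux_ge_pairwise (A : List Int) : ∀ (m : Int),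
    (∀ y ∈ pmaxAux (some m) A, m ≤ y) ∧ List.Pairwise (· ≤ ·) (pmaxAux (some m) A) := by
  induction A with
  | nil => intro m; simp [pmaxAux]
  | cons x xs ih =>
    intro m
    simp only [pmaxAux]
    set m' := if x > m then x else m with hm'
    have hmm' : m ≤ m' := by rw [hm']; split <;> omega
    obtain ⟨hge, hpw⟩ := ih m'
    constructor
    · intro y hy
      rcases List.mem_cons.mp hy with h | h
      · omega
      · have := hge y h; omega
    · exact List.pairwise_cons.mpr ⟨hge, hpw⟩

theorem pmax_pairwise (A : List Int) : List.Pairwise (· ≤ ·) (pmaxAux none A) := by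
  cases A with
  | nil => simp [pmaxAux]
  | cons x xs =>
    simp only [pmaxAux]
    obtain ⟨hge, hpw⟩ := pmaxAux_ge_pairwise xs x
    exact List.pairwise_cons.mpr ⟨hge, hpw⟩

theorem dropK_eq (n : Int) (M : List Int) (hp : List.Pairwise (· ≤ ·) M) :
    ∀ (k : Nat), kickedLoop n M ≤ k → k ≤ M.length → dropK n M k = kickedLoop n M := by
  intro k
  induction k with
  | zero => intro h _; simp [dropK]; omega
  | succ k ih =>
    intro h hlen
    simp only [dropK]
    by_cases hg : M.getD k 0 > n
    · rw [if_pos hg]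
      have hle : kickedLoop n M ≤ k := by
        by_contra hc
        have : k < kickedLoop n M := by omega
        have := getD_le_of_lt_kicked n M k this
        omega
      exact ih hle (by omega)
    · rw [if_neg hg]
      by_contra hne
      have hlt : kickedLoop n M ≤ k := by omega
      have := lt_getD_of_kicked_le n M k hp hlt (by omega)
      omega

theorem iterate_winners (A : List Int) (c : Nat) (hc : 0 < c) :
    ∀ (t : Nat) (n : Int), (∀ j : Nat, j < t → kickedLoop (n - (j : Int) * (c : Int)) A = c) →
    winners n A = winners (n - (t : Int) * (c : Int)) A := by
  intro t
  induction t with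
  | zero => intro n _; simp
  | succ t ih =>
    intro n hall
    have h1 : winners n A = winners (n - (t : Int) * (c : Int)) A :=
      ih n (fun j hj => hall j (by omega))
    have ht : kickedLoop (n - (t : Int) * (c : Int)) A = c := hall t (by omega)
    rw [h1]
    conv_lhs => rw [winners]
    rw [if_neg (by rw [ht]; omega), ht]
    congr 1
    push_cast
    ring

theorem outer_eq (A : List Int) : ∀ (c : Nat) (n : Int) (k : Nat),
    kickedLoop n A = c → c ≤ k → k ≤ (pmaxAux none A).length →
    outerLoop n (pmaxAux none A) k = winners n A := by
  intro c
  induction c using Nat.strong_induction_on with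
  | _ c ih =>
    intro n k hc hck hklen
    have hpw := pmax_pairwise A
    have hcM : kickedLoop n (pmaxAux none A) = c := by rw [kicked_pmax]; exact hc
    have hdrop : dropK n (pmaxAux none A) k = c := by
      rw [dropK_eq n _ hpw k (by omega) hklen, hcM]
    rw [outerLoop]
    by_cases hc0 : c = 0
    · rw [dif_pos (by rw [hdrop]; exact hc0)]
      conv_rhs => rw [winners]
      rw [if_pos (by rw [hc]; exact hc0)]
    · rw [dif_neg (by rw [hdrop]; exact hc0)]
      rw [hdrop]
      set M := pmaxAux none A with hM
      set m := M.getD (c - 1) 0 with hmdef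
      set q := PySem.Int.floordiv (n - m) (c : Int) with hq
      have hcpos : (0 : Int) < (c : Int) := by exact_mod_cast Nat.pos_of_ne_zero hc0
      have hbr := (PySem.Int.floordiv_eq_iff_of_pos (a := n - m) (b := (c : Int)) hcpos).mp hq.symm
      have hmn : m ≤ n := getD_le_of_lt_kicked n M (c - 1) (by omega)
      have hq0 : 0 ≤ q := by
        by_contra hneg
        have : q + 1 ≤ 0 := by omega
        nlinarith [hbr.2]
      -- the landing value
      have hland : n - (q + 1) * (c : Int) < m := by nlinarith [hbr.2]
      -- intermediate counts all equal c
      have hmid : ∀ j : Nat, j < (q + 1).toNat →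
          kickedLoop (n - (j : Int) * (c : Int)) A = c := by
        intro j hj
        have hjq : (j : Int) ≤ q := by omega
        have hge_m : m ≤ n - (j : Int) * (c : Int) := by nlinarith [hbr.1]
        have hle_n : n - (j : Int) * (c : Int) ≤ n := by nlinarith
        have hub : kickedLoop (n - (j : Int) * (c : Int)) A ≤ c :=
          le_of_le_of_eq (kicked_mono A _ n hle_n) hc
        have hlb : c ≤ kickedLoop (n - (j : Int) * (c : Int)) A := by
          rw [← kicked_pmax]
          apply le_kicked_of_getD_le _ M c
          · intro i hi
            have h1 : M.getD i 0 ≤ m :=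
              getD_mono M hpw i (c - 1) (by omega)
                (by rw [← hcM] at *; have := kicked_le_length n M; omega)
            omega
          · rw [← hcM]; exact kicked_le_length n M
        omega
      have hiter := iterate_winners A c (Nat.pos_of_ne_zero hc0) (q + 1).toNat n hmid
      have hcast : ((q + 1).toNat : Int) = q + 1 := by omega
      rw [hcast] at hiter
      -- new count strictly smaller
      have hnew : kickedLoop (n - (q + 1) * (c : Int)) A < c := by
        have hub : kickedLoop (n - (q + 1) * (c : Int)) A ≤ c :=
          le_of_le_of_eq (kicked_mono A _ n (by nlinarith)) hc
        by_contra hcon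
        have heq : kickedLoop (n - (q + 1) * (c : Int)) A = c := by omega
        have : m ≤ n - (q + 1) * (c : Int) := by
          apply getD_le_of_lt_kicked _ M (c - 1)
          rw [kicked_pmax, heq]; omega
        omega
      have hrec := ih _ hnew (n - (q + 1) * (c : Int)) c rfl (by omega)
        (by rw [← hcM]; exact kicked_le_length n M)
      show outerLoop (n - (PySem.Int.floordiv (n - m) (c : Int) + 1) * (c : Int)) M c = winners n A
      rw [← hq]
      exact hrec.trans hiter.symm

theorem main_eq (n : Int) (A : List Int) : winners n A = winners_alt n A := by
  unfold winners_alt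
  exact (outer_eq A (kickedLoop n A) n (pmaxAux none A).length rfl
    (by rw [← kicked_pmax n A]; exact kicked_le_length n _) le_rfl).symm

-- ===== VERDICT (by name: the statement is the Claim_ definition above) =====
theorem winners_spec : Claim_equal_winners := by
  intro n A _
  unfold Spec_winners
  exact main_eq n A
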